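-- pv_equiv track=rewrite | github.com/mounaiban/studycapt | sample_blots.py | _p4_get_row
-- ===== SOURCE A (Python) =====
-- def _p4_get_row(w, v, t):
--     """
--     Format a row of pixel values 'v' for a P4 raster 'w' pixels wide.
--     Any pixel of value 't' and above will be set.
--
--     Pixels are returned as a row of packed ints (8-bit int where each
--     bit represents one pixel).
--
--     """
--     out = 0x0
--     mask = 0x80
--     i = 0
--     for val in v:
--         if val >= t: out |= mask
--         mask >>= 1
--         i += 1
--         if not mask:
--             yield out
--             out = 0x0 # PROTIP: fn starts here on next call
--             mask = 0x80
--             # See: https://docs.python.org/3/tutorial/classes.html#generators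
--     if i%8: yield out # flush out the last byte of the row
-- ===== SOURCE B (Python) =====
-- def _p4_get_row(w, v, t):
--     """Chunk v into groups of up to 8 pixels and pack each group directly."""
--     group = []
--     for val in v:
--         group.append(val)
--         if len(group) == 8:
--             yield sum(0x80 >> j for j, x in enumerate(group) if x >= t)
--             group = []
--     if group:
--         yield sum(0x80 >> j for j, x in enumerate(group) if x >= t)
-- ===== Notes on version B (the rewrite author's own statement) =====
-- stated objective: alternative
-- what changed: B replaces A's running bit-mask/accumulator/pixel-counter state machine by a single-pass chunker that collects groups of up to 8 pixels and packs each group in one shot as a sum of shifted bits over enumerate.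
import Mathlib
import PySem

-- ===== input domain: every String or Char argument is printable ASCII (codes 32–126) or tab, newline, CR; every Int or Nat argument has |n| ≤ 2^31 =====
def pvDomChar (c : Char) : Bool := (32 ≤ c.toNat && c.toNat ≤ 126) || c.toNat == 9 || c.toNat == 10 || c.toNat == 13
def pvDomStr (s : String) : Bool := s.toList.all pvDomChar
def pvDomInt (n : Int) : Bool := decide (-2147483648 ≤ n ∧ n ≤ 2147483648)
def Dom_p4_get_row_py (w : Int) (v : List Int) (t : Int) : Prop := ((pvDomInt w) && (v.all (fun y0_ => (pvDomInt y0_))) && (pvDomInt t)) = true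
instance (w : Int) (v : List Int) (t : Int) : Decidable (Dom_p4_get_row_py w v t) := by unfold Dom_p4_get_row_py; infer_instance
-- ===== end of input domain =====

-- B packs each chunk of up to 8 pixels in one shot instead of A's running mask/accumulator/counter state machine; objective: alternative (same cost).
-- Both Pythons are generators; equivalence is about the produced sequence of values (as a list).

-- ===== PORT A =====
-- A's loop state: out (byte being built), mask (current bit), i (pixel counter), acc (values yielded so far).
def p4A_loop (t : Int) : List Int → Int → Int → Int → List Int → List Int
  | [], out, _mask, i, acc =>
    -- "if i%8: yield out"
    if PySem.Int.mod i 8 ≠ 0 then acc ++ [out] else acc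
  | val :: rest, out, mask, i, acc =>
    let out := if val ≥ t then PySem.Int.bor out mask else out
    let mask := mask >>> (1 : Nat)
    let i := i + 1
    if mask = 0 then p4A_loop t rest 0 0x80 i (acc ++ [out])
    else p4A_loop t rest out mask i acc

def p4_get_row_py (w : Int) (v : List Int) (t : Int) : List Int :=
  p4A_loop t v 0 0x80 0 []

-- ===== PORT B =====
-- sum(0x80 >> j for j, x in enumerate(group) if x >= t); enumerate index is ≥ 0, so .toNat is exact
def packByte (t : Int) (group : List Int) : Int :=
  (((PySem.List.enumerate group 0).filter (fun p => p.2 ≥ t)).map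
    (fun p => (0x80 : Int) >>> p.1.toNat)).sum

def p4B_loop (t : Int) : List Int → List Int → List Int → List Int
  | [], group, acc => if group ≠ [] then acc ++ [packByte t group] else acc
  | val :: rest, group, acc =>
    let group := group ++ [val]
    if group.length = 8 then p4B_loop t rest [] (acc ++ [packByte t group])
    else p4B_loop t rest group acc

def p4_get_row_py_alt (w : Int) (v : List Int) (t : Int) : List Int :=
  p4B_loop t v [] []

-- ===== PRECONDITION & SPEC =====
def Spec_p4_get_row_py (w : Int) (v : List Int) (t : Int) (out : List Int) : Prop := out = p4_get_row_py_alt w v t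
instance (w : Int) (v : List Int) (t : Int) (out : List Int) : Decidable (Spec_p4_get_row_py w v t out) := by unfold Spec_p4_get_row_py; infer_instance

-- ===== CLAIM (what is proved, stated in full; the proofs are below) =====
def Claim_equal_p4_get_row_py : Prop := ∀ (w : Int) (v : List Int) (t : Int), Dom_p4_get_row_py w v t → Spec_p4_get_row_py w v t (p4_get_row_py w v t)

-- ===== LEMMAS AND PROOFS =====

-- common reference: chunk v into groups of 8 and pack each
def chunkSpec (t : Int) : List Int → List Int
  | [] => []
  | val :: rest => packByte t ((val :: rest).take 8) :: chunkSpec t ((val :: rest).drop 8)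
  termination_by v => v.length
  decreasing_by simp only [List.length_drop, List.length_cons]; omega

theorem chunkSpec_nil (t : Int) : chunkSpec t [] = [] := by
  unfold chunkSpec
  rfl

theorem chunkSpec_of_ne_nil (t : Int) (v : List Int) (h : v ≠ []) :
    chunkSpec t v = packByte t (v.take 8) :: chunkSpec t (v.drop 8) := by
  cases v with
  | nil => exact absurd rfl h
  | cons a l => rw [chunkSpec]

theorem chunkSpec_short (t : Int) (g : List Int) (h : g.length < 8) (hne : g ≠ []) :
    chunkSpec t g = [packByte t g] := by
  rw [chunkSpec_of_ne_nil t g hne, List.take_of_length_le (by omega),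
      List.drop_of_length_le (by omega), chunkSpec_nil]

theorem shift128 (k : Nat) (h : k ≤ 7) :
    (0x80 : Int) >>> k = ((2 ^ (7 - k) : Nat) : Int) := by
  interval_cases k <;> decide

theorem packByte_append (t : Int) (g : List Int) (x : Int) :
    packByte t (g ++ [x]) =
      packByte t g + (if x ≥ t then (0x80 : Int) >>> g.length else 0) := by
  unfold packByte
  rw [PySem.List.enumerate_append, List.filter_append, List.map_append, List.sum_append]
  by_cases hx : x ≥ t <;> simp [hx, PySem.List.enumerate, Int.shiftRight_natCast_right]

theorem nat_bor_lemma : ∀ k < 8, ∀ m < 2 ^ k,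
    (m * 2 ^ (8 - k)) ||| 2 ^ (7 - k) = m * 2 ^ (8 - k) + 2 ^ (7 - k) := by decide

theorem packByte_bound (t : Int) : ∀ (g : List Int), g.length ≤ 8 →
    ∃ m : Nat, m < 2 ^ g.length ∧ packByte t g = ((m * 2 ^ (8 - g.length) : Nat) : Int) := by
  intro g
  induction g using List.reverseRecOn with
  | nil => intro _; exact ⟨0, by decide, by simp [packByte, PySem.List.enumerate]⟩
  | append_singleton g x ih =>
    intro hlen
    simp at hlen
    obtain ⟨m, hm, hpack⟩ := ih (by omega)
    rw [packByte_append, hpack, shift128 g.length (by omega)]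
    by_cases hx : x ≥ t
    · refine ⟨2 * m + 1, by simp; omega, ?_⟩
      simp [hx]
      have h1 : (8 : Nat) - g.length = (7 - g.length) + 1 := by omega
      rw [h1]
      push_cast [pow_succ]
      ring
    · refine ⟨2 * m, by simp; omega, ?_⟩
      simp [hx]
      have h1 : (8 : Nat) - g.length = (7 - g.length) + 1 := by omega
      rw [h1]
      push_cast [pow_succ]
      ring

theorem packByte_snoc (t : Int) (g : List Int) (x : Int) (h : g.length < 8) :
    packByte t (g ++ [x]) =
      if x ≥ t then PySem.Int.bor (packByte t g) ((0x80 : Int) >>> g.length)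
      else packByte t g := by
  rw [packByte_append]
  by_cases hx : x ≥ t
  · simp only [hx, if_pos]
    obtain ⟨m, hm, hpack⟩ := packByte_bound t g (by omega)
    rw [hpack, shift128 g.length (by omega), PySem.Int.bor_natCast,
        nat_bor_lemma g.length (by omega) m hm]
    push_cast; ring
  · simp [hx]

theorem shift128_step (k : Nat) (h : k ≤ 7) :
    ((0x80 : Int) >>> k) >>> (1 : Nat) = (0x80 : Int) >>> (k + 1) := by
  interval_cases k <;> decide

theorem shift128_eq_zero_iff (k : Nat) (h : k ≤ 8) :
    (0x80 : Int) >>> k = 0 ↔ k = 8 := by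
  interval_cases k <;> simp <;> decide

-- B's chunker computes chunkSpec of group ++ remaining input
theorem p4B_loop_eq (t : Int) : ∀ (v g acc : List Int), g.length < 8 →
    p4B_loop t v g acc = acc ++ chunkSpec t (g ++ v) := by
  intro v
  induction v with
  | nil =>
    intro g acc hg
    by_cases hne : g = []
    · subst hne; simp [p4B_loop, chunkSpec_nil]
    · simp [p4B_loop, hne, chunkSpec_short t g hg hne]
  | cons val rest ih =>
    intro g acc hg
    simp only [p4B_loop]
    by_cases h8 : (g ++ [val]).length = 8
    · rw [if_pos h8, ih [] (acc ++ [packByte t (g ++ [val])]) (by simp)]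
      have hne : g ++ val :: rest ≠ [] := by simp
      rw [chunkSpec_of_ne_nil t _ hne]
      have hgv : g ++ val :: rest = (g ++ [val]) ++ rest := by simp
      rw [hgv, List.take_append_of_le_length (by omega),
          List.drop_append_of_le_length (by omega)]
      simp at h8
      rw [List.take_of_length_le (by simp; omega), List.drop_of_length_le (by simp; omega)]
      simp
    · rw [if_neg h8, ih (g ++ [val]) acc (by simp at h8 ⊢; omega)]
      simp

-- A's state machine computes the same chunkSpec: out/mask/i are determined by the current partial group g
theorem p4A_loop_eq (t : Int) : ∀ (v g acc : List Int) (i : Int), g.length < 8 →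
    PySem.Int.mod i 8 = g.length →
    p4A_loop t v (packByte t g) ((0x80 : Int) >>> g.length) i acc =
      acc ++ chunkSpec t (g ++ v) := by
  intro v
  induction v with
  | nil =>
    intro g acc i hg hi
    simp only [p4A_loop, hi]
    by_cases hne : g = []
    · subst hne; simp [chunkSpec_nil]
    · have : (g.length : Int) ≠ 0 := by
        simpa using fun h => hne (List.length_eq_zero_iff.mp h)
      simp [hne, chunkSpec_short t g hg hne]
  | cons val rest ih =>
    intro g acc i hg hi
    simp only [p4A_loop]
    rw [← packByte_snoc t g val hg, shift128_step g.length (by omega)]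
    have hi8 : PySem.Int.mod (i + 1) 8 = ((g.length + 1) % 8 : Nat) := by
      rw [PySem.Int.mod_eq_emod_of_pos (by norm_num)] at hi ⊢
      push_cast
      omega
    by_cases h7 : g.length = 7
    · have hz : (0x80 : Int) >>> (g.length + 1) = 0 := by
        rw [h7]; decide
      rw [if_pos hz]
      have h0 : (0 : Int) = packByte t [] := by simp [packByte, PySem.List.enumerate]
      have hm : (0x80 : Int) = (0x80 : Int) >>> (List.length ([] : List Int)) := by decide
      rw [h0, hm, ih [] _ (i + 1) (by simp) (by rw [hi8, h7]; simp)]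
      have hne : g ++ val :: rest ≠ [] := by simp
      rw [chunkSpec_of_ne_nil t _ hne]
      have hgv : g ++ val :: rest = (g ++ [val]) ++ rest := by simp
      rw [hgv, List.take_append_of_le_length (by simp; omega),
          List.drop_append_of_le_length (by simp; omega)]
      rw [List.take_of_length_le (by simp; omega), List.drop_of_length_le (by simp; omega)]
      simp
    · have hnz : ¬ ((0x80 : Int) >>> (g.length + 1) = 0) := by
        rw [shift128_eq_zero_iff (g.length + 1) (by omega)]
        omega
      rw [if_neg hnz]
      have hl : g.length + 1 = (g ++ [val]).length := by simp
      rw [hl, ih (g ++ [val]) acc (i + 1) (by simp; omega)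
            (by rw [hi8]; simp; omega)]
      simp

-- ===== VERDICT (by name: the statement is the Claim_ definition above) =====
theorem p4_get_row_py_spec : Claim_equal_p4_get_row_py := by
  intro w v t _
  unfold Spec_p4_get_row_py p4_get_row_py p4_get_row_py_alt
  have hA := p4A_loop_eq t v [] [] 0 (by simp) (by decide)
  have hB := p4B_loop_eq t v [] [] (by simp)
  have e1 : packByte t [] = 0 := by simp [packByte, PySem.List.enumerate]
  have e2 : (0x80 : Int) >>> (List.length ([] : List Int)) = 0x80 := by decide
  rw [e1, e2] at hA
  rw [hA, hB]
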